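-- pv_equiv track=rewrite | github.com/akbknight/anomaly-detection-monitor | src/pipeline/runner.py | deduplicate_anomalies
-- ===== SOURCE A (Python) =====
-- def deduplicate_anomalies(anomalies: list[dict]) -> list[dict]:
--     """Collapse multiple detections on the same date to the highest-severity one.
--
--     When Z-score, IQR, and CUSUM all flag the same month, retaining three
--     separate entries would over-count the event. This function keeps only the
--     detection with the highest severity for each calendar date, then returns
--     results sorted chronologically.
--
--     Parameters
--     ----------
--     anomalies : list[dict]
--         Combined list of anomaly dicts from all detectors. Each dict must
--         contain at least ``"date"`` and ``"severity"`` keys.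
--
--     Returns
--     -------
--     list[dict]
--         Deduplicated list sorted by ``"date"`` ascending.
--     """
--     seen: dict[str, dict] = {}
--     priority = {"high": 3, "medium": 2, "low": 1}
--
--     for a in anomalies:
--         key = a["date"]
--         if key not in seen or priority[a["severity"]] > priority[seen[key]["severity"]]:
--             seen[key] = a
--
--     return sorted(seen.values(), key=lambda x: x["date"])
-- ===== SOURCE B (Python) =====
-- def deduplicate_anomalies(anomalies: list[dict]) -> list[dict]:
--     """Collapse multiple detections on the same date to the highest-severity one.
--
--     Alternative decomposition: sort the distinct dates, then for each date scan
--     the input once and keep the first detection of maximal severity.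
--     """
--     priority = {"high": 3, "medium": 2, "low": 1}
--     dates = sorted({a["date"] for a in anomalies})
--     result = []
--     for d in dates:
--         best = None
--         for a in anomalies:
--             if a["date"] == d and (
--                 best is None
--                 or priority[a["severity"]] > priority[best["severity"]]
--             ):
--                 best = a
--         result.append(best)
--     return result
-- ===== Notes on version B (the rewrite author's own statement) =====
-- stated objective: alternative
-- what changed: Replaces the dict-accumulation pass with a sort of the distinct dates followed by a per-date linear scan that selects the first maximal-severity detection; no dict of winners is maintained.
import Mathlib
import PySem

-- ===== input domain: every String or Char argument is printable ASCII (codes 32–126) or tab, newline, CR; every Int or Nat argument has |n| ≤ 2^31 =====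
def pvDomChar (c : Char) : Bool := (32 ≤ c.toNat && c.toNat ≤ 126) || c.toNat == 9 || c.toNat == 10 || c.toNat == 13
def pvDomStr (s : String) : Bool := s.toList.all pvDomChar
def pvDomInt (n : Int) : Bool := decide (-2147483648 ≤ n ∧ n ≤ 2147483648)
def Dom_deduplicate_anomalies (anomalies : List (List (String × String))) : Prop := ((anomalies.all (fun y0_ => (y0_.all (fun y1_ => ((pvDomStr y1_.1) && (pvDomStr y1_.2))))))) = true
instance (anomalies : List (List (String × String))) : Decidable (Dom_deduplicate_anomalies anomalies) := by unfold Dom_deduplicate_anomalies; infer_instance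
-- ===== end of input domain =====

-- B replaces A's winner-dict accumulation by sorting the distinct dates and scanning the input
-- once per date for the first maximal-severity entry (objective: alternative decomposition).

-- shared context helpers: a["date"] / a["severity"] / priority[s] (total forms; Pre_ excludes the raising inputs)
def pvKeyOf (a : List (String × String)) : String := (PySem.Dict.mk a).getD "date" ""
def pvSevOf (a : List (String × String)) : String := (PySem.Dict.mk a).getD "severity" ""
def pvPrio (s : String) : Int := (PySem.Dict.mk [("high", (3 : Int)), ("medium", (2 : Int)), ("low", (1 : Int))]).getD s 0

-- ===== PORT A =====
-- loop body: if key not in seen or priority[a["severity"]] > priority[seen[key]["severity"]]: seen[key] = a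
def pvStepA (seen : PySem.Dict String (List (String × String))) (a : List (String × String)) : PySem.Dict String (List (String × String)) :=
  let key := pvKeyOf a
  if seen.contains key = false ∨ pvPrio (pvSevOf a) > pvPrio (pvSevOf (seen.getD key [])) then
    seen.insert key a
  else seen

def deduplicate_anomalies (anomalies : List (List (String × String))) : List (List (String × String)) :=
  let seen := anomalies.foldl pvStepA PySem.Dict.empty
  PySem.List.sorted seen.values pvKeyOf false

-- ===== PORT B =====
-- inner-loop body: if a["date"] == d and (best is None or priority[a["severity"]] > priority[best["severity"]]): best = a
def pvStepB (d : String) (best : Option (List (String × String))) (a : List (String × String)) : Option (List (String × String)) :=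
  if pvKeyOf a = d ∧ (best = none ∨ pvPrio (pvSevOf a) > pvPrio (pvSevOf (best.getD []))) then some a else best

def pvBestFor (anomalies : List (List (String × String))) (d : String) : Option (List (String × String)) :=
  anomalies.foldl (pvStepB d) none

def deduplicate_anomalies_alt (anomalies : List (List (String × String))) : List (List (String × String)) :=
  let dates := PySem.List.sorted (PySem.Set.ofList (anomalies.map pvKeyOf)) (fun x => x) false
  -- result.append(best); best is never None since d is one of the dates, so the total form .getD [] is exact
  dates.foldl (fun result d => result ++ [(pvBestFor anomalies d).getD []]) []

-- ===== PRECONDITION & SPEC =====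
-- Pre_ excludes exactly the inputs where Python A raises: an entry without a "date" key (KeyError),
-- or an entry whose date occurs in ≥ 2 entries but whose severity is missing or outside
-- {"high","medium","low"} (KeyError in the comparison, which A only performs on duplicated dates).
def Pre_deduplicate_anomalies (anomalies : List (List (String × String))) : Prop :=
  ∀ a ∈ anomalies,
    ((PySem.Dict.mk a).get? "date").isSome = true ∧
    (2 ≤ (anomalies.filter (fun b => pvKeyOf b == pvKeyOf a)).length →
      ((PySem.Dict.mk a).get? "severity" = some "high" ∨
       (PySem.Dict.mk a).get? "severity" = some "medium" ∨
       (PySem.Dict.mk a).get? "severity" = some "low"))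
instance (anomalies : List (List (String × String))) : Decidable (Pre_deduplicate_anomalies anomalies) := by unfold Pre_deduplicate_anomalies; infer_instance

def pvWitness_deduplicate_anomalies : (List (List (String × String))) :=
  [[("date", "2024-01"), ("severity", "low")],
   [("date", "2024-01"), ("severity", "high")],
   [("date", "2023-12"), ("severity", "medium")]]

def Spec_deduplicate_anomalies (anomalies : List (List (String × String))) (out : List (List (String × String))) : Prop := out = deduplicate_anomalies_alt anomalies
instance (anomalies : List (List (String × String))) (out : List (List (String × String))) : Decidable (Spec_deduplicate_anomalies anomalies out) := by unfold Spec_deduplicate_anomalies; infer_instance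

-- ===== CLAIM (what is proved, stated in full; the proofs are below) =====
def Claim_equal_deduplicate_anomalies : Prop := ∀ (anomalies : List (List (String × String))), Dom_deduplicate_anomalies anomalies → Pre_deduplicate_anomalies anomalies → Spec_deduplicate_anomalies anomalies (deduplicate_anomalies anomalies)

-- ===== LEMMAS AND PROOFS =====

-- B's inner fold, generalized accumulator: none iff started from none and no entry has date d
theorem pvFoldB_eq_none_iff (l : List (List (String × String))) (d : String) (best : Option (List (String × String))) :
    l.foldl (pvStepB d) best = none ↔ best = none ∧ d ∉ l.map pvKeyOf := by
  induction l generalizing best with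
  | nil => simp
  | cons a l ih =>
    rw [List.foldl_cons, ih, List.map_cons]
    unfold pvStepB
    split_ifs with h
    · constructor
      · rintro ⟨hno, -⟩; cases hno
      · rintro ⟨rfl, hnm⟩
        exact absurd (List.mem_cons.mpr (Or.inl h.1.symm)) hnm
    · constructor
      · rintro ⟨rfl, hnm⟩
        refine ⟨rfl, ?_⟩
        intro hmem
        rcases List.mem_cons.mp hmem with hd | hm
        · exact h ⟨hd.symm, Or.inl rfl⟩
        · exact hnm hm
      · rintro ⟨hb, hnm⟩
        exact ⟨hb, fun hm => hnm (List.mem_cons_of_mem _ hm)⟩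

theorem pvBestFor_eq_none_iff (l : List (List (String × String))) (d : String) :
    pvBestFor l d = none ↔ d ∉ l.map pvKeyOf := by
  unfold pvBestFor; rw [pvFoldB_eq_none_iff]; simp

-- a winner produced by the fold has date d (or was already the accumulator)
theorem pvFoldB_key (l : List (List (String × String))) (d : String) (best : Option (List (String × String))) (b : List (String × String))
    (h : l.foldl (pvStepB d) best = some b) : pvKeyOf b = d ∨ best = some b := by
  induction l generalizing best with
  | nil => exact Or.inr h
  | cons a l ih =>
    rw [List.foldl_cons] at h
    rcases ih _ h with hk | hs
    · exact Or.inl hk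
    · unfold pvStepB at hs
      split_ifs at hs with hc
      · cases hs; exact Or.inl hc.1
      · exact Or.inr hs

theorem pvBestFor_key (l : List (List (String × String))) (d : String) (b : List (String × String))
    (h : pvBestFor l d = some b) : pvKeyOf b = d := by
  rcases pvFoldB_key l d none b h with hk | hs
  · exact hk
  · cases hs

-- appending one entry to the scanned list is one pvStepB update
theorem pvBestFor_append (l : List (List (String × String))) (a : List (String × String)) (d : String) :
    pvBestFor (l ++ [a]) d = pvStepB d (pvBestFor l d) a := by
  unfold pvBestFor; rw [List.foldl_append]; rfl

theorem pvBestFor_append_of_ne (l : List (List (String × String))) (a : List (String × String)) (d : String)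
    (h : pvKeyOf a ≠ d) : pvBestFor (l ++ [a]) d = pvBestFor l d := by
  rw [pvBestFor_append]; unfold pvStepB
  rw [if_neg]; rintro ⟨hk, -⟩; exact h hk

-- MAIN INVARIANT: A's dict after the loop lists, per first-occurrence-ordered distinct date,
-- the first maximal-severity entry for that date (= B's per-date scan result).
theorem pvSeen_items (l : List (List (String × String))) :
    (l.foldl pvStepA PySem.Dict.empty).items =
      (PySem.Set.ofList (l.map pvKeyOf)).map (fun d => (d, (pvBestFor l d).getD [])) := by
  induction l using List.reverseRecOn with
  | nil => rfl
  | append_singleton l a ih =>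
    rw [List.foldl_append, List.foldl_cons, List.foldl_nil, List.map_append, List.map_singleton,
      PySem.Set.ofList_append_singleton]
    set s := List.foldl pvStepA PySem.Dict.empty l with hs
    have hkeys : s.keys = PySem.Set.ofList (l.map pvKeyOf) := by
      simp only [PySem.Dict.keys, ih, List.map_map]
      exact (List.map_congr_left fun d _ => rfl).trans (List.map_id _)
    have hnd : s.keys.Nodup := by
      rw [hkeys]; exact PySem.Set.nodup_ofList _
    by_cases hk : pvKeyOf a ∈ l.map pvKeyOf
    · -- date already seen
      have hcont : s.contains (pvKeyOf a) = true := by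
        rw [PySem.Dict.contains_eq_decide_mem_keys, hkeys]
        simp [PySem.Set.mem_ofList, hk]
      obtain ⟨b0, hb0⟩ : ∃ b0, pvBestFor l (pvKeyOf a) = some b0 := by
        rcases h : pvBestFor l (pvKeyOf a) with _ | b0
        · exact absurd hk ((pvBestFor_eq_none_iff l _).mp h)
        · exact ⟨b0, rfl⟩
      have hgetD : s.getD (pvKeyOf a) [] = b0 := by
        have hmem : (pvKeyOf a, (pvBestFor l (pvKeyOf a)).getD []) ∈ s.items := by
          rw [ih]
          exact List.mem_map_of_mem ((PySem.Set.mem_ofList _ _).mpr hk)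
        rw [hb0] at hmem
        exact PySem.Dict.getD_of_mem_items s hmem hnd []
      have hadd : PySem.Set.add (PySem.Set.ofList (l.map pvKeyOf)) (pvKeyOf a)
          = PySem.Set.ofList (l.map pvKeyOf) :=
        PySem.Set.add_of_mem ((PySem.Set.mem_ofList _ _).mpr hk)
      rw [hadd]
      unfold pvStepA
      by_cases hgt : pvPrio (pvSevOf a) > pvPrio (pvSevOf b0)
      · rw [if_pos (Or.inr (by rw [hgetD]; exact hgt)),
          PySem.Dict.items_insert_of_contains s a hcont, ih, List.map_map]
        refine List.map_congr_left ?_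
        intro d hd
        by_cases hdk : d = pvKeyOf a
        · have hba : pvBestFor (l ++ [a]) (pvKeyOf a) = some a := by
            rw [pvBestFor_append, hb0]
            unfold pvStepB
            rw [if_pos ⟨rfl, Or.inr hgt⟩]
          rw [hdk]
          simp [Function.comp, hba]
        · have hbe : pvBestFor (l ++ [a]) d = pvBestFor l d :=
            pvBestFor_append_of_ne l a d (fun h => hdk h.symm)
          simp [Function.comp, hbe, hdk]
      · rw [if_neg (by
          rintro (hc | hgt')
          · rw [hcont] at hc; cases hc
          · rw [hgetD] at hgt'; exact hgt hgt'), ih]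
        refine List.map_congr_left ?_
        intro d hd
        by_cases hdk : d = pvKeyOf a
        · have hbe : pvBestFor (l ++ [a]) (pvKeyOf a) = pvBestFor l (pvKeyOf a) := by
            rw [pvBestFor_append, hb0]
            unfold pvStepB
            rw [if_neg]
            rintro ⟨-, h | h⟩
            · cases h
            · exact hgt (by simpa using h)
          rw [hdk, hbe]
        · rw [pvBestFor_append_of_ne l a d (fun h => hdk h.symm)]
    · -- fresh date: the insert appends at the end
      have hcont : s.contains (pvKeyOf a) = false := by
        rw [PySem.Dict.contains_eq_decide_mem_keys, hkeys]
        simp [PySem.Set.mem_ofList, hk]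
      have hbnone : pvBestFor l (pvKeyOf a) = none := (pvBestFor_eq_none_iff l _).mpr hk
      have hadd : PySem.Set.add (PySem.Set.ofList (l.map pvKeyOf)) (pvKeyOf a)
          = PySem.Set.ofList (l.map pvKeyOf) ++ [pvKeyOf a] :=
        PySem.Set.add_of_not_mem (fun h => hk ((PySem.Set.mem_ofList _ _).mp h))
      unfold pvStepA
      rw [if_pos (Or.inl hcont), PySem.Dict.items_insert_of_not_contains s a hcont,
        ih, hadd, List.map_append, List.map_singleton]
      congr 1
      · refine List.map_congr_left ?_
        intro d hd
        have hdk : d ≠ pvKeyOf a := by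
          rintro rfl
          exact hk ((PySem.Set.mem_ofList _ _).mp hd)
        rw [pvBestFor_append_of_ne l a d (fun h => hdk h.symm)]
      · have hba : pvBestFor (l ++ [a]) (pvKeyOf a) = some a := by
          rw [pvBestFor_append, hbnone]
          unfold pvStepB
          rw [if_pos ⟨rfl, Or.inl rfl⟩]
        simp [hba]

-- every date listed by the set has a winner carrying that date
theorem pvKey_best (l : List (List (String × String))) (d : String) (hd : d ∈ PySem.Set.ofList (l.map pvKeyOf)) :
    pvKeyOf ((pvBestFor l d).getD []) = d := by
  rcases h : pvBestFor l d with _ | b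
  · exact absurd ((pvBestFor_eq_none_iff l d).mp h)
      (by simpa using (PySem.Set.mem_ofList _ _).mp hd)
  · simpa using pvBestFor_key l d b h

theorem pvPorts_agree (anomalies : List (List (String × String))) :
    deduplicate_anomalies anomalies = deduplicate_anomalies_alt anomalies := by
  unfold deduplicate_anomalies deduplicate_anomalies_alt
  dsimp only
  have hvals : (anomalies.foldl pvStepA PySem.Dict.empty).values
      = (PySem.Set.ofList (anomalies.map pvKeyOf)).map (fun d => (pvBestFor anomalies d).getD []) := by
    simp only [PySem.Dict.values, pvSeen_items, List.map_map]
    rfl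
  rw [hvals, PySem.List.foldl_append_singleton_eq_map, List.nil_append]
  refine PySem.List.sorted_eq_of_perm_of_pairwise_lt _ _ _ ?_ ?_
  · exact (PySem.List.sorted_perm _ _ _).map _
  · rw [List.pairwise_map]
    have hp := PySem.List.sorted_ofList_pairwise_lt (anomalies.map pvKeyOf)
    refine hp.imp_of_mem ?_
    intro d e hd he hlt
    have hd' : d ∈ PySem.Set.ofList (anomalies.map pvKeyOf) :=
      (PySem.List.mem_sorted _ _ _ _).mp hd
    have he' : e ∈ PySem.Set.ofList (anomalies.map pvKeyOf) :=
      (PySem.List.mem_sorted _ _ _ _).mp he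
    rw [pvKey_best _ _ hd', pvKey_best _ _ he']
    exact hlt

-- ===== VERDICT (by name: the statement is the Claim_ definition above) =====
theorem deduplicate_anomalies_spec : Claim_equal_deduplicate_anomalies := by
  intro anomalies _ _
  unfold Spec_deduplicate_anomalies
  exact pvPorts_agree anomalies
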